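-- pv_equiv track=rewrite | github.com/Iyusuf40/alx-intern-interview | test.py | maxLettersPrintable
-- ===== SOURCE A (Python) =====
-- def maxLettersPrintable(n, pre_print):
--     """
--     finds nunmber of A to be printed after n operations
--     """
--     clip_board = 0
--     total_printed = 0
--     ops = []
--     optimum_ops = ["Ctrl-A", "Ctrl-C", "Ctrl-V"]
--
--     if n < pre_print:
--         pre_print = n
--
--     printed = pre_print
--     ops = ["A"] * printed
--     to_do = n - printed
--
--     while to_do != 0:
--         if to_do % 4 and "Ctrl-C" in ops:
--             # not at the start of 4 sequence so
--             # paste from clipboard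
--             ops += ["Ctrl-V"]
--             done = 1
--             printed += clip_board
--         elif to_do > 2 and (printed * 2) > (clip_board * 3):
--             # at the start of 4 op sequece
--             # so copy all and paste
--             ops += optimum_ops
--             done = 3
--             # when to_do is reduced by 3 it will automatically
--             # mean that only one operation will make it
--             # become a 4 sequence again
--             # so if to_do % 4 and "Ctrl-C" in ops: block will run
--             # only once
--             # giving the pattern ["Ctrl-A", "Ctrl-C", "Ctrl-V", "Ctrl-V""]
--             clip_board = printed
--             printed *= 2
--         else:
--             ops += ["Ctrl-V"]
--             done = 1
--             printed += clip_board
--         to_do -= done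
--
--     final_ops = ops
--
--     for op in final_ops:
--         if op == "A":
--             total_printed += 1
--         elif op == "Ctrl-A":
--             copied = total_printed
--         elif op == "Ctrl-C":
--             clip_board = copied
--         elif op == "Ctrl-V":
--             total_printed += clip_board
--     outp = "{} -> for the sequence: {}".format(
--         total_printed, ", ".join(final_ops)
--         )
--     return total_printed, outp
-- ===== SOURCE B (Python) =====
-- def maxLettersPrintable(n, pre_print):
--     """
--     Closed-form version: the greedy keystroke sequence is fully regular, so
--     both the count and the sequence are computed directly instead of being
--     simulated keystroke by keystroke.
--
--     After typing k = min(n, pre_print) letters, if at least 3 ops remain the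
--     optimal greedy run is one select-copy-paste, then m = (t-3) % 4 extra
--     pastes, then r = (t-3-m) // 4 blocks of [select, copy, paste, paste],
--     each of which triples the count: total = (2+m) * k * 3**r.
--     With fewer than 3 remaining ops (or nothing typed) the remaining ops are
--     all pastes of an empty clipboard and the count is just max(k, 0).
--     """
--     k = n if n < pre_print else pre_print
--     t = n - k
--     if k >= 1 and t >= 3:
--         m = (t - 3) % 4
--         r = (t - 3 - m) // 4
--         total = (2 + m) * k * 3 ** r
--         seq = (["A"] * k
--                + ["Ctrl-A", "Ctrl-C", "Ctrl-V"]
--                + ["Ctrl-V"] * m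
--                + ["Ctrl-A", "Ctrl-C", "Ctrl-V", "Ctrl-V"] * r)
--     else:
--         total = k if k >= 1 else 0
--         seq = ["A"] * k + ["Ctrl-V"] * t
--     return total, "{} -> for the sequence: {}".format(total, ", ".join(seq))
-- ===== Notes on version B (the rewrite author's own statement) =====
-- stated objective: faster
-- what changed: B replaces A's keystroke-by-keystroke greedy simulation plus a second replay pass with a closed form: the greedy run is provably 'k letters, one copy-paste, (t-3)%4 extra pastes, then (t-3-m)//4 tripling blocks', so the count is (2+m)*k*3**r computed arithmetically and the sequence is assembled from repeated blocks.
import Mathlib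
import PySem

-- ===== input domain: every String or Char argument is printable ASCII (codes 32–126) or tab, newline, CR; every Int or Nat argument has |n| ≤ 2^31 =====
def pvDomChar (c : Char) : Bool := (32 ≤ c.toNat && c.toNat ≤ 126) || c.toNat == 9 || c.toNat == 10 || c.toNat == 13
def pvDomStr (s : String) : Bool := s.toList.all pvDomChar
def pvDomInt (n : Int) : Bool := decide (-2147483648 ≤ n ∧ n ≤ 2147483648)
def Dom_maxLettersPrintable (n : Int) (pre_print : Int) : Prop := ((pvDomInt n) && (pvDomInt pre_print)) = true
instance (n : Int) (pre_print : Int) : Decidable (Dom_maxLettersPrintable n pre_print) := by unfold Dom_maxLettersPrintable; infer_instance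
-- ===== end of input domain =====

-- B replaces A's keystroke-by-keystroke simulation + replay pass by a closed form
-- for the greedy run (count = (2+m)*k*3^r, sequence assembled from repeated blocks): faster.


-- ===== PORT A =====
-- A's while loop; returns (ops, clip_board) since A's later replay loop reads the
-- leftover clip_board variable.  Guard 'to_do ≤ 0': Python's 'while to_do != 0'
-- diverges for negative to_do, which the entry point never produces (to_do = n - printed ≥ 0).
def pvLoopA (clip_board printed to_do : Int) (ops : List String) : List String × Int :=
  if to_do ≤ 0 then (ops, clip_board)
  else if PySem.Int.mod to_do 4 ≠ 0 ∧ ops.contains "Ctrl-C" = true then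
    pvLoopA clip_board (printed + clip_board) (to_do - 1) (ops ++ ["Ctrl-V"])
  else if to_do > 2 ∧ printed * 2 > clip_board * 3 then
    pvLoopA printed (printed * 2) (to_do - 3) (ops ++ ["Ctrl-A", "Ctrl-C", "Ctrl-V"])
  else
    pvLoopA clip_board (printed + clip_board) (to_do - 1) (ops ++ ["Ctrl-V"])
termination_by to_do.toNat
decreasing_by all_goals omega

-- one step of A's replay loop over final_ops; state = (total_printed, copied, clip_board)
-- ('copied' starts at 0: Python leaves it undefined, but every "Ctrl-C" in ops is
-- immediately preceded by a "Ctrl-A", so the initial value is never read)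
def pvReplayStep (st : Int × Int × Int) (op : String) : Int × Int × Int :=
  if op = "A" then (st.1 + 1, st.2.1, st.2.2)
  else if op = "Ctrl-A" then (st.1, st.1, st.2.2)
  else if op = "Ctrl-C" then (st.1, st.2.1, st.2.1)
  else if op = "Ctrl-V" then (st.1 + st.2.2, st.2.1, st.2.2)
  else st

def maxLettersPrintable (n : Int) (pre_print : Int) : Int × String :=
  let clip_board : Int := 0
  let pre_print' : Int := if n < pre_print then n else pre_print
  let printed : Int := pre_print'
  let ops : List String := List.replicate printed.toNat "A"   -- ["A"] * printed
  let to_do : Int := n - printed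
  let r := pvLoopA clip_board printed to_do ops
  let final_ops := r.1
  let st := List.foldl pvReplayStep (0, 0, r.2) final_ops
  let total_printed := st.1
  (total_printed,
   PySem.Int.toStr total_printed ++ " -> for the sequence: " ++ PySem.Str.join ", " final_ops)

-- ===== PORT B =====
-- B is loop-free: k letters, then (if at least 3 ops remain) one select-copy-paste,
-- m = (t-3) % 4 extra pastes and r = (t-3-m) // 4 four-op tripling blocks.
def maxLettersPrintable_alt (n : Int) (pre_print : Int) : Int × String :=
  let k : Int := if n < pre_print then n else pre_print
  let t : Int := n - k
  if 1 ≤ k ∧ 3 ≤ t then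
    let m : Int := PySem.Int.mod (t - 3) 4
    let r : Int := PySem.Int.floordiv (t - 3 - m) 4
    let total : Int := (2 + m) * k * 3 ^ r.toNat
    let seq : List String :=
      List.replicate k.toNat "A"
        ++ ["Ctrl-A", "Ctrl-C", "Ctrl-V"]
        ++ List.replicate m.toNat "Ctrl-V"
        ++ (List.replicate r.toNat ["Ctrl-A", "Ctrl-C", "Ctrl-V", "Ctrl-V"]).flatten
    (total, PySem.Int.toStr total ++ " -> for the sequence: " ++ PySem.Str.join ", " seq)
  else
    let total : Int := if 1 ≤ k then k else 0
    let seq : List String := List.replicate k.toNat "A" ++ List.replicate t.toNat "Ctrl-V"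
    (total, PySem.Int.toStr total ++ " -> for the sequence: " ++ PySem.Str.join ", " seq)

-- ===== PRECONDITION & SPEC =====
def Spec_maxLettersPrintable (n : Int) (pre_print : Int) (out : Int × String) : Prop := out = maxLettersPrintable_alt n pre_print
instance (n : Int) (pre_print : Int) (out : Int × String) : Decidable (Spec_maxLettersPrintable n pre_print out) := by unfold Spec_maxLettersPrintable; infer_instance

-- ===== CLAIM (what is proved, stated in full; the proofs are below) =====
def Claim_equal_maxLettersPrintable : Prop := ∀ (n : Int) (pre_print : Int), Dom_maxLettersPrintable n pre_print → Spec_maxLettersPrintable n pre_print (maxLettersPrintable n pre_print)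

-- ===== LEMMAS AND PROOFS =====

-- proof-only intermediate: A's loop with the printed count carried inline
def pvLoopB (clip count to_do : Int) (copied_yet : Bool) (parts : List String) :
    Int × List String :=
  if to_do ≤ 0 then (count, parts)
  else if PySem.Int.mod to_do 4 ≠ 0 ∧ copied_yet = true then
    pvLoopB clip (count + clip) (to_do - 1) copied_yet (parts ++ ["Ctrl-V"])
  else if to_do > 2 ∧ count * 2 > clip * 3 then
    pvLoopB count (count * 2) (to_do - 3) true (parts ++ ["Ctrl-A", "Ctrl-C", "Ctrl-V"])
  else
    pvLoopB clip (count + clip) (to_do - 1) copied_yet (parts ++ ["Ctrl-V"])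
termination_by to_do.toNat
decreasing_by all_goals omega

-- replaying m letters "A" only increments the total
lemma pv_replay_replicate (m : Nat) (t cp k : Int) :
    List.foldl pvReplayStep (t, cp, k) (List.replicate m "A") = (t + m, cp, k) := by
  induction m generalizing t with
  | zero => simp
  | succ m ih =>
      rw [List.replicate_succ, List.foldl_cons]
      have hstep : pvReplayStep (t, cp, k) "A" = (t + 1, cp, k) := by simp [pvReplayStep]
      rw [hstep, ih]
      exact Prod.ext (by push_cast; ring) rfl

-- the coupled-loop invariant: A's loop and the intermediate loop build the same sequence,
-- and replaying A's sequence (from A's leftover clip_board) yields the inline count.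
lemma pv_loop_eq (clipA printed td : Int) (ops : List String) :
    ∀ (clipB count : Int) (flag : Bool),
    clipA = clipB →
    (printed = count ∨ (printed < 0 ∧ count = 0 ∧ clipB = 0)) →
    ops.contains "Ctrl-C" = flag →
    (flag = false → ops.contains "Ctrl-V" = true → (count ≤ 0 ∨ td ≤ 2)) →
    (flag = false → clipB = 0) →
    (∀ c : Int, (flag = false → (c = 0 ∨ ops.contains "Ctrl-V" = false)) →
        (List.foldl pvReplayStep (0, 0, c) ops).1 = count ∧
        (List.foldl pvReplayStep (0, 0, c) ops).2.2 = (if flag then clipB else c)) →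
    (pvLoopA clipA printed td ops).1 = (pvLoopB clipB count td flag ops).2 ∧
    (List.foldl pvReplayStep (0, 0, (pvLoopA clipA printed td ops).2)
        (pvLoopA clipA printed td ops).1).1 = (pvLoopB clipB count td flag ops).1 := by
  induction clipA, printed, td, ops using pvLoopA.induct with
  | case1 clipA printed td ops hle =>
      intro clipB count flag hclip hpc hflag hV hclip0 hrep
      rw [pvLoopA, pvLoopB, if_pos hle, if_pos hle]
      refine ⟨rfl, ?_⟩
      have := hrep clipB (fun hf => Or.inl (hclip0 hf))
      simpa [hclip] using this.1
  | case2 clipA printed td ops hle hc ih =>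
      -- branch 1: paste from clipboard (a Ctrl-C is already in ops, so flag = true)
      intro clipB count flag hclip hpc hflag hV hclip0 hrep
      have hf : flag = true := by rw [← hflag]; exact hc.2
      subst hclip hf
      rw [pvLoopA, pvLoopB, if_neg hle, if_neg hle, if_pos hc, if_pos ⟨hc.1, rfl⟩]
      refine ih clipA (count + clipA) true rfl ?_ ?_ ?_ ?_ ?_
      · rcases hpc with h | ⟨h1, h2, h3⟩
        · exact Or.inl (by omega)
        · exact Or.inr ⟨by omega, by omega, h3⟩
      · simp only [List.contains_append, hflag, Bool.true_or]
      · simp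
      · simp
      · intro c _
        have := hrep c (by simp)
        rw [List.foldl_append]
        constructor
        · simp [List.foldl, pvReplayStep, this.1, this.2]
        · simp [List.foldl, pvReplayStep, this.2]
  | case3 clipA printed td ops hle hc hb ih =>
      -- branch 2: Ctrl-A, Ctrl-C, Ctrl-V (select-all, copy, paste)
      intro clipB count flag hclip hpc hflag hV hclip0 hrep
      subst hclip
      have hcnt : printed = count := by
        rcases hpc with h | ⟨hneg, h0, hc0⟩
        · exact h
        · exfalso; rw [hc0] at hb; nlinarith [hb.2]
      subst hcnt
      -- no "Ctrl-V" can be in ops yet if no copy has happened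
      have hnoV : flag = false → ops.contains "Ctrl-V" = false := by
        intro hfl
        have hc0 := hclip0 hfl
        have hcpos : 0 < printed := by rw [hc0] at hb; nlinarith [hb.2]
        by_contra h
        simp only [Bool.not_eq_false] at h
        rcases hV hfl h with h1 | h1
        · omega
        · exact absurd hb.1 (by omega)
      have hcB : ¬ (PySem.Int.mod td 4 ≠ 0 ∧ flag = true) :=
        fun h => hc ⟨h.1, by rw [hflag]; exact h.2⟩
      rw [pvLoopA, pvLoopB, if_neg hle, if_neg hle, if_neg hc, if_neg hcB,
          if_pos hb, if_pos hb]
      refine ih printed (printed * 2) true rfl (Or.inl rfl) ?_ ?_ ?_ ?_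
      · simp
      · simp
      · simp
      · intro c _
        have := hrep c (fun hfl => Or.inr (hnoV hfl))
        rw [List.foldl_append]
        rcases this with ⟨h1, h2⟩
        constructor
        · simp [List.foldl, pvReplayStep, h1]; ring
        · simp [List.foldl, pvReplayStep, h1]
  | case4 clipA printed td ops hle hc hb ih =>
      -- branch 3: plain paste
      intro clipB count flag hclip hpc hflag hV hclip0 hrep
      subst hclip
      have hbB : ¬ (td > 2 ∧ count * 2 > clipA * 3) := by
        intro h
        apply hb
        refine ⟨h.1, ?_⟩
        rcases hpc with hcnt | ⟨hneg, h0, hc0⟩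
        · rw [hcnt]; exact h.2
        · rw [h0, hc0] at h; omega
      have hcB : ¬ (PySem.Int.mod td 4 ≠ 0 ∧ flag = true) :=
        fun h => hc ⟨h.1, by rw [hflag]; exact h.2⟩
      rw [pvLoopA, pvLoopB, if_neg hle, if_neg hle, if_neg hc, if_neg hcB,
          if_neg hb, if_neg hbB]
      cases flag with
      | true =>
          refine ih clipA (count + clipA) true rfl ?_ ?_ ?_ ?_ ?_
          · rcases hpc with h | ⟨h1, h2, h3⟩
            · exact Or.inl (by omega)
            · exact Or.inr ⟨by omega, by omega, h3⟩
          · simp only [List.contains_append, hflag, Bool.true_or]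
          · simp
          · simp
          · intro c _
            have := hrep c (by simp)
            rw [List.foldl_append]
            constructor
            · simp [List.foldl, pvReplayStep, this.1, this.2]
            · simp [List.foldl, pvReplayStep, this.2]
      | false =>
          have hc0 : clipA = 0 := hclip0 rfl
          refine ih clipA (count + clipA) false rfl ?_ ?_ ?_ ?_ ?_
          · rcases hpc with h | ⟨h1, h2, h3⟩
            · exact Or.inl (by omega)
            · exact Or.inr ⟨by omega, by omega, h3⟩
          · simp only [List.contains_append, hflag, Bool.false_or]
            decide
          · intro _ _
            -- this branch fired with no copy yet (clip = 0): td ≤ 2 or count ≤ 0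
            rw [hc0] at hbB
            push Not at hbB
            by_cases h : td > 2
            · exact Or.inl (by have := hbB h; omega)
            · exact Or.inr (by omega)
          · intro _; exact hc0
          · intro c hcc
            rcases hcc rfl with hcz | hnov
            · have := hrep c (fun _ => Or.inl hcz)
              rw [List.foldl_append]
              subst hcz
              constructor
              · simp [List.foldl, pvReplayStep, this.1, this.2, hc0]
              · simp [List.foldl, pvReplayStep, this.2]
            · exfalso; simp at hnov

-- A as the intermediate loop (proved via pv_loop_eq)
lemma pv_A_eq_mid (n pre_print : Int) :
    maxLettersPrintable n pre_print =
      (let k := min n pre_print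
       let parts := List.replicate k.toNat "A"
       let r := pvLoopB 0 ((parts.length : Int)) (n - k) false parts
       (r.1, PySem.Int.toStr r.1 ++ " -> for the sequence: " ++ PySem.Str.join ", " r.2)) := by
  unfold maxLettersPrintable
  have hk : (if n < pre_print then n else pre_print) = min n pre_print := by
    rcases lt_trichotomy n pre_print with h | h | h <;> simp [min_def] <;> omega
  simp only [hk]
  set k := min n pre_print with hkdef
  have hmain := pv_loop_eq 0 k (n - k) (List.replicate k.toNat "A")
      0 ((List.replicate k.toNat "A").length : Int) false rfl
      (by rcases lt_or_ge k 0 with h | h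
          · exact Or.inr ⟨h, by simp [Int.toNat_of_nonpos h.le], rfl⟩
          · exact Or.inl (by simp [Int.toNat_of_nonneg h]))
      (by simp)
      (by intro _ h; simp at h)
      (fun _ => rfl)
      (by intro c _
          rw [pv_replay_replicate]
          exact ⟨by simp, by simp⟩)
  simp only [List.length_replicate] at hmain ⊢
  rw [hmain.2, hmain.1]

-- before a copy ever happened the remaining ops are all empty pastes
lemma pvB_novel (tn : Nat) : ∀ (t cnt : Int) (parts : List String),
    t.toNat = tn → 0 ≤ t → (cnt ≤ 0 ∨ t ≤ 2) →
    pvLoopB 0 cnt t false parts = (cnt, parts ++ List.replicate t.toNat "Ctrl-V") := by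
  induction tn with
  | zero =>
      intro t cnt parts htn ht _
      have : t = 0 := by omega
      subst this
      rw [pvLoopB, if_pos le_rfl]
      simp
  | succ m ih =>
      intro t cnt parts htn ht h
      have ht1 : 1 ≤ t := by omega
      rw [pvLoopB, if_neg (by omega), if_neg (by simp), if_neg (by omega)]
      rw [ih (t - 1) (cnt + 0) (parts ++ ["Ctrl-V"]) (by omega) (by omega) (by omega)]
      have : t.toNat = (t - 1).toNat + 1 := by omega
      rw [this, List.replicate_succ]
      simp

-- after a copy, pastes are taken one at a time until to_do is a multiple of 4
lemma pvB_paste (m : Nat) : ∀ (clip cnt t : Int) (parts : List String),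
    m ≤ 3 → (m : Int) ≤ t → PySem.Int.mod t 4 = m →
    pvLoopB clip cnt t true parts =
      pvLoopB clip (cnt + m * clip) (t - m) true (parts ++ List.replicate m "Ctrl-V") := by
  induction m with
  | zero => intro clip cnt t parts _ _ _; simp
  | succ m ih =>
      intro clip cnt t parts hm3 hmt hmod
      have hme : PySem.Int.mod t 4 = t % 4 := PySem.Int.mod_eq_emod_of_pos (by omega)
      have hmod4 : t % 4 = (m : Int) + 1 := by rw [← hme, hmod]; push_cast; ring
      have hmt' : ((m:Int)) + 1 ≤ t := by push_cast at hmt; omega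
      rw [pvLoopB, if_neg (by omega), if_pos ⟨by rw [hme]; omega, rfl⟩]
      have hrec := ih clip (cnt + clip) (t - 1) (parts ++ ["Ctrl-V"]) (by omega) (by omega)
          (by rw [PySem.Int.mod_eq_emod_of_pos (by omega)]; omega)
      rw [hrec]
      congr 1
      · push_cast; ring
      · push_cast; ring_nf
      · rw [List.replicate_succ]; simp

-- from a multiple of 4 with a productive clipboard, each 4-op block triples the count
lemma pvB_steady (r : Nat) : ∀ (clip cnt t : Int) (parts : List String),
    t = 4 * r → 1 ≤ clip → clip * 3 < cnt * 2 →
    pvLoopB clip cnt t true parts =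
      (cnt * 3 ^ r,
       parts ++ (List.replicate r ["Ctrl-A", "Ctrl-C", "Ctrl-V", "Ctrl-V"]).flatten) := by
  induction r with
  | zero =>
      intro clip cnt t parts ht _ _
      subst ht
      rw [pvLoopB, if_pos (by norm_num)]
      simp
  | succ q ih =>
      intro clip cnt t parts ht hclip hratio
      have ht4 : t = 4 * (q : Int) + 4 := by push_cast at ht ⊢; omega
      have hcnt2 : 2 ≤ cnt := by nlinarith
      rw [pvLoopB, if_neg (by omega),
          if_neg (by rw [PySem.Int.mod_eq_emod_of_pos (by omega)]; simp; omega),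
          if_pos ⟨by omega, by omega⟩]
      rw [pvB_paste 1 cnt (cnt * 2) (t - 3) _ (by omega) (by push_cast; omega)
          (by rw [PySem.Int.mod_eq_emod_of_pos (by omega)]; push_cast; omega)]
      have hrec := ih cnt (cnt * 2 + (1:Nat) * cnt) (t - 3 - (1:Nat)) (parts ++ ["Ctrl-A", "Ctrl-C", "Ctrl-V"] ++ List.replicate 1 "Ctrl-V") (by push_cast; omega) (by omega) (by push_cast; nlinarith)
      rw [hrec, Prod.mk.injEq]
      constructor
      · push_cast; ring
      · simp [List.replicate_succ]

-- the intermediate loop equals B's closed form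
lemma pv_mid_eq_alt (n pre_print : Int) :
    (let k := min n pre_print
     let parts := List.replicate k.toNat "A"
     let r := pvLoopB 0 ((parts.length : Int)) (n - k) false parts
     (r.1, PySem.Int.toStr r.1 ++ " -> for the sequence: " ++ PySem.Str.join ", " r.2)) =
    maxLettersPrintable_alt n pre_print := by
  unfold maxLettersPrintable_alt
  have hk : (if n < pre_print then n else pre_print) = min n pre_print := by
    rcases lt_trichotomy n pre_print with h | h | h <;> simp [min_def] <;> omega
  simp only [hk, List.length_replicate]
  set k := min n pre_print with hkdef
  have ht0 : 0 ≤ n - k := by omega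
  by_cases hmain : 1 ≤ k ∧ 3 ≤ n - k
  · obtain ⟨hk1, ht3⟩ := hmain
    rw [if_pos ⟨hk1, ht3⟩]
    have hkc : ((k.toNat : Int)) = k := by omega
    set t := n - k with htdef
    set m : Int := PySem.Int.mod (t - 3) 4 with hmdef
    have hmem : m = (t - 3) % 4 := by
      rw [hmdef, PySem.Int.mod_eq_emod_of_pos (by omega)]
    have hm03 : 0 ≤ m ∧ m ≤ 3 := by omega
    set r : Int := PySem.Int.floordiv (t - 3 - m) 4 with hrdef
    have hrem : r = (t - 3 - m) / 4 := by
      rw [hrdef, PySem.Int.floordiv_eq_ediv_of_pos (by omega)]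
    have hr0 : 0 ≤ r := by omega
    have hr4 : 4 * r = t - 3 - m := by omega
    -- unfold the first iteration: the initial Ctrl-A, Ctrl-C, Ctrl-V
    rw [pvLoopB, if_neg (by omega), if_neg (by simp),
        if_pos ⟨by omega, by rw [hkc]; omega⟩]
    rw [pvB_paste m.toNat ((k.toNat:Int)) ((k.toNat:Int) * 2) (t - 3) _ (by omega)
        (by omega) (by rw [hmdef]; omega)]
    rw [pvB_steady r.toNat ((k.toNat:Int)) ((k.toNat:Int) * 2 + (m.toNat : Int) * (k.toNat:Int))
        (t - 3 - (m.toNat : Int)) _ (by omega) (by omega) (by rw [hkc]; nlinarith [hm03.1])]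
    have hcount : ((k.toNat:Int) * 2 + (m.toNat : Int) * (k.toNat:Int)) * 3 ^ r.toNat
        = (2 + m) * k * 3 ^ r.toNat := by rw [hkc]; have : ((m.toNat : Int)) = m := by omega
                                          rw [this]; ring
    rw [hcount]
  · rw [if_neg hmain]
    have hdis : (((k.toNat : Int)) ≤ 0 ∨ n - k ≤ 2) := by
      by_cases h1 : 1 ≤ k
      · refine Or.inr ?_
        rcases not_and_or.mp hmain with h | h <;> omega
      · exact Or.inl (by omega)
    rw [pvB_novel (n - k).toNat (n - k) _ _ rfl ht0 hdis]
    have htot : ((k.toNat : Int)) = (if 1 ≤ k then k else 0) := by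
      split_ifs with h <;> omega
    rw [htot]

-- ===== VERDICT (by name: the statement is the Claim_ definition above) =====
theorem maxLettersPrintable_spec : Claim_equal_maxLettersPrintable := by
  intro n pre_print _
  unfold Spec_maxLettersPrintable
  rw [pv_A_eq_mid, pv_mid_eq_alt]
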